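-- pv_equiv track=rewrite | github.com/VeriXAI/Outside-the-Box | utils/Helpers.py | get_markers
-- ===== SOURCE A (Python) =====
-- from copy import copy
--
-- def get_markers(n_classes):
--     all_markers = ["o", "s", "^", "*", "p", "X", "D", "2", ".", "<", ">", "v"]
--     if n_classes > len(all_markers):
--         markers = copy(all_markers)
--         while n_classes > len(markers):
--             markers.extend(markers)
--     else:
--         markers = all_markers
--     return markers[:n_classes]
-- ===== SOURCE B (Python) =====
-- def get_markers(n_classes):
--     all_markers = ["o", "s", "^", "*", "p", "X", "D", "2", ".", "<", ">", "v"]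
--     if n_classes > len(all_markers):
--         return [all_markers[i % len(all_markers)] for i in range(n_classes)]
--     return all_markers[:n_classes]
-- ===== Notes on version B (the rewrite author's own statement) =====
-- stated objective: idiomatic
-- what changed: Replaces the whileloop that repeatedly doubles a copied marker list and then truncates with a single-pass modular-index comprehension over range(n_classes); the small-n branch keeps the plain slice.
import Mathlib
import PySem

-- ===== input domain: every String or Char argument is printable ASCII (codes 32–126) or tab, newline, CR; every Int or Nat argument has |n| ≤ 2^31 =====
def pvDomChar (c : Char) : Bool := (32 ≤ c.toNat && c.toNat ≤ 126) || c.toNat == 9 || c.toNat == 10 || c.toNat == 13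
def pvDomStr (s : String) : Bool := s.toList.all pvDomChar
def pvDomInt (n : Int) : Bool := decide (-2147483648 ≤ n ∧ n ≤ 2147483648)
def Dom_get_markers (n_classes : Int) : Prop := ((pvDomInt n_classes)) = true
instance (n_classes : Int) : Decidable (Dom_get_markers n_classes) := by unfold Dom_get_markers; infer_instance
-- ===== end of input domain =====

-- B replaces A's copy-and-double-until-long-enough loop by a one-pass modular-index map (idiomatic; return value only).

-- ===== PORT A =====
def allMarkersA : List String := ["o", "s", "^", "*", "p", "X", "D", "2", ".", "<", ">", "v"]

-- the 'while n_classes > len(markers): markers.extend(markers)' loop; the positivity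
-- hypothesis only justifies termination (the list doubles each iteration)
def growMarkersA (n : Int) (ms : List String) (h : 0 < ms.length) : List String :=
  if n > (ms.length : Int) then
    growMarkersA n (ms ++ ms) (by simp; omega)
  else ms
termination_by n.toNat - ms.length
decreasing_by simp; omega

def get_markers (n_classes : Int) : List String :=
  let markers :=
    if n_classes > (allMarkersA.length : Int) then
      growMarkersA n_classes allMarkersA (by decide)
    else allMarkersA
  PySem.List.slice markers none (some n_classes)

-- ===== PORT B =====
def allMarkersB : List String := ["o", "s", "^", "*", "p", "X", "D", "2", ".", "<", ">", "v"]

def get_markers_alt (n_classes : Int) : List String :=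
  if n_classes > (allMarkersB.length : Int) then
    -- [all_markers[i % len(all_markers)] for i in range(n_classes)]; the index i % 12 is
    -- always in range, so pyGetD's default is never used
    (PySem.List.pyRange 0 n_classes 1).map
      (fun i => PySem.List.pyGetD allMarkersB (PySem.Int.mod i (allMarkersB.length : Int)) "")
  else PySem.List.slice allMarkersB none (some n_classes)

-- ===== PRECONDITION & SPEC =====
def Spec_get_markers (n_classes : Int) (out : List String) : Prop := out = get_markers_alt n_classes
instance (n_classes : Int) (out : List String) : Decidable (Spec_get_markers n_classes out) := by unfold Spec_get_markers; infer_instance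

-- ===== CLAIM (what is proved, stated in full; the proofs are below) =====
def Claim_equal_get_markers : Prop := ∀ (n_classes : Int), Dom_get_markers n_classes → Spec_get_markers n_classes (get_markers n_classes)

-- ===== LEMMAS AND PROOFS =====

-- invariant of the doubling loop: every entry repeats allMarkersA with period 12
def Periodic12 (L : List String) : Prop :=
  ∀ k, k < L.length → L.getD k "" = allMarkersA.getD (k % 12) ""

lemma periodic12_append {L : List String} (hp : Periodic12 L) (hd : 12 ∣ L.length) :
    Periodic12 (L ++ L) := by
  intro k hk
  simp at hk
  by_cases h : k < L.length
  · rw [List.getD_eq_getElem?_getD, List.getElem?_append_left h,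
      ← List.getD_eq_getElem?_getD]
    exact hp k h
  · replace h : L.length ≤ k := Nat.le_of_not_lt h
    rw [List.getD_eq_getElem?_getD, List.getElem?_append_right h,
      ← List.getD_eq_getElem?_getD]
    have h2 : k - L.length < L.length := by omega
    have heq : (k - L.length) % 12 = k % 12 := by
      obtain ⟨m, hm⟩ := hd
      omega
    have := hp (k - L.length) h2
    rwa [heq] at this

lemma growMarkersA_spec (n : Int) (ms : List String) (h : 0 < ms.length)
    (hp : Periodic12 ms) (hd : 12 ∣ ms.length) :
    Periodic12 (growMarkersA n ms h) ∧ 12 ∣ (growMarkersA n ms h).length ∧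
      n ≤ ((growMarkersA n ms h).length : Int) := by
  induction ms, h using growMarkersA.induct n with
  | case1 ms h hc ih =>
      have hc' : n > (ms.length : Int) := hc
      rw [growMarkersA, if_pos hc']
      exact ih (periodic12_append hp hd) (by simp; omega)
  | case2 ms h hc =>
      have hc' : ¬ n > (ms.length : Int) := hc
      rw [growMarkersA, if_neg hc']
      exact ⟨hp, hd, by omega⟩

lemma periodic12_base : Periodic12 allMarkersA := by
  intro k hk
  simp [allMarkersA] at hk
  interval_cases k <;> rfl

theorem get_markers_spec : Claim_equal_get_markers := by
  intro n _
  unfold Spec_get_markers get_markers get_markers_alt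
  show PySem.List.slice
      (if n > ((allMarkersA.length : Int)) then growMarkersA n allMarkersA (by decide)
       else allMarkersA) none (some n) = _
  by_cases hn : n > (allMarkersA.length : Int)
  · have hn' : n > (allMarkersB.length : Int) := hn
    rw [if_pos hn, if_pos hn']
    have hs := growMarkersA_spec n allMarkersA (by decide) periodic12_base (by decide)
    obtain ⟨hp, hd, hlen⟩ := hs
    set L := growMarkersA n allMarkersA (by decide) with hL
    have h0 : (0:Int) ≤ n := by simp at hn; omega
    rw [PySem.List.slice_to _ h0, PySem.List.pyRange_one]
    apply List.ext_getElem
    · simp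
      omega
    · intro k hk1 hk2
      simp only [List.getElem_take, List.getElem_map, List.getElem_range]
      have hkL : k < L.length := by
        simp only [List.length_take, Nat.lt_min] at hk1
        exact hk1.2
      have hmod : PySem.Int.mod ((0:Int) + (k:Int)) ((allMarkersB.length : Int)) = ((k % 12 : Nat) : Int) := by
        simp [allMarkersB]
      rw [hmod, PySem.List.pyGetD_natCast]
      have hA := hp k hkL
      rw [List.getD_eq_getElem?_getD, List.getElem?_eq_getElem hkL, Option.getD_some] at hA
      exact hA.trans rfl
  · have hn' : ¬ n > ((allMarkersB.length : Nat) : Int) := hn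
    rw [if_neg hn, if_neg hn']
    rfl
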